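-- pv_equiv track=rewrite | github.com/Shiyuan-Huang-23/acsl-programs | AllStars/Canasta.py | calc
-- ===== SOURCE A (Python) =====
-- def calc(group):
--     points = 0
--     for i in group:
--         if i == "4" or i == "5" or i == "6":
--             points += 5
--         elif i == "A" or i == "2":
--             points += 20
--         elif i == "&":
--             points += 50
--         else:
--             points += 10
--     return points
-- ===== SOURCE B (Python) =====
-- SCORE = {"4": 5, "5": 5, "6": 5, "A": 20, "2": 20, "&": 50}
--
-- def calc(group):
--     g = list(group)
--
--     def go(lo, hi):
--         if hi - lo == 0:
--             return 0
--         if hi - lo == 1: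
--             return SCORE.get(g[lo], 10)
--         mid = (lo + hi) // 2
--         return go(lo, mid) + go(mid, hi)
--
--     return go(0, len(g))
-- ===== Notes on version B (the rewrite author's own statement) =====
-- stated objective: alternative
-- what changed: Replaces A's single accumulator loop with branch chain by a divide-and-conquer recursion over index ranges that scores each single card through a score table (dict.get with default 10) and sums the halves.
import Mathlib
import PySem

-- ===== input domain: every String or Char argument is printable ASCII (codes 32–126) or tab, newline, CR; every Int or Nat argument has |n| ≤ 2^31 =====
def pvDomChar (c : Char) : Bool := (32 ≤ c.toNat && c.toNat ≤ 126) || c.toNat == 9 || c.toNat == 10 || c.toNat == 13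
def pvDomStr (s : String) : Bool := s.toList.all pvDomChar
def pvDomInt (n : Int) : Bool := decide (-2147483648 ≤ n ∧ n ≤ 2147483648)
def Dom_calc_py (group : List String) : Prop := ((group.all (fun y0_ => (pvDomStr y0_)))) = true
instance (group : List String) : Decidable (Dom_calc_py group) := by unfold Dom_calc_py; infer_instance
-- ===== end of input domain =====

-- B replaces A's single accumulator loop with a divide-and-conquer recursion over index
-- ranges, scoring single cards through a score table (dict.get, default 10); alternative decomposition, same cost.
-- ===== PORT A =====
def calc_py (group : List String) : Int :=
  group.foldl (fun points i =>
    if i = "4" ∨ i = "5" ∨ i = "6" then points + 5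
    else if i = "A" ∨ i = "2" then points + 20
    else if i = "&" then points + 50
    else points + 10) 0

-- ===== PORT B =====
-- the module-level SCORE dict
def pvSCORE : PySem.Dict String Int :=
  PySem.Dict.ofList [("4", 5), ("5", 5), ("6", 5), ("A", 20), ("2", 20), ("&", 50)]

-- inner 'go(lo, hi)': g[lo] is in range whenever 0 ≤ lo < hi ≤ len g at every call,
-- so PySem.List.pyGet? returns some; getD "" is exact there.
-- go(lo, hi); the extra fuel argument (called with fuel = hi - lo, enough since each half
-- of the split is strictly smaller) is only a structural totality guard, never reached
def pvGoFuel (g : List String) : Nat → Nat → Nat → Int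
  | fuel, lo, hi =>
    if hi - lo = 0 then 0
    else if hi - lo = 1 then pvSCORE.getD ((PySem.List.pyGet? g (lo : Int)).getD "") 10
    else
      match fuel with
      | 0 => 0
      | f + 1 =>
        let mid := (lo + hi) / 2
        pvGoFuel g f lo mid + pvGoFuel g f mid hi

def pvGo (g : List String) (lo hi : Nat) : Int := pvGoFuel g (hi - lo) lo hi

def calc_py_alt (group : List String) : Int :=
  pvGo group 0 group.length

-- ===== PRECONDITION & SPEC =====
def Spec_calc_py (group : List String) (out : Int) : Prop := out = calc_py_alt group
instance (group : List String) (out : Int) : Decidable (Spec_calc_py group out) := by unfold Spec_calc_py; infer_instance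

-- ===== CLAIM (what is proved, stated in full; the proofs are below) =====
def Claim_equal_calc_py : Prop := ∀ (group : List String), Dom_calc_py group → Spec_calc_py group (calc_py group)

-- ===== LEMMAS AND PROOFS =====

-- per-card score
def pvW (s : String) : Int := pvSCORE.getD s 10

theorem pvW_eq (s : String) :
    pvW s = (if s = "4" ∨ s = "5" ∨ s = "6" then (5 : Int)
      else if s = "A" ∨ s = "2" then 20 else if s = "&" then 50 else 10) := by
  simp only [pvW]
  split_ifs with h1 h2 h3 <;>
    first
    | (rcases h1 with h | h | h <;> subst h <;> decide)
    | (rcases h2 with h | h <;> subst h <;> decide)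
    | (subst h3; decide)
    | (push_neg at h1 h2
       obtain ⟨a1, a2, a3⟩ := h1
       obtain ⟨b1, b2⟩ := h2
       have hd : pvSCORE = PySem.Dict.mk [("4", (5 : Int)), ("5", 5), ("6", 5), ("A", 20), ("2", 20), ("&", 50)] := by decide
       simp [hd, PySem.Dict.getD, beq_iff_eq,
             Ne.symm a1, Ne.symm a2, Ne.symm a3, Ne.symm b1, Ne.symm b2, Ne.symm h3, PySem.Dict.get?])

theorem calc_py_foldl_shift (l : List String) (a : Int) :
    l.foldl (fun points i =>
      if i = "4" ∨ i = "5" ∨ i = "6" then points + 5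
      else if i = "A" ∨ i = "2" then points + 20
      else if i = "&" then points + 50
      else points + 10) a
    = a + calc_py l := by
  induction l generalizing a with
  | nil => simp [calc_py]
  | cons h t ih =>
    simp only [calc_py, List.foldl_cons]
    rw [ih, ih]
    split_ifs <;> ring

-- A equals the sum of pvW over the list
theorem calc_py_eq_sum (l : List String) : calc_py l = (l.map pvW).sum := by
  induction l with
  | nil => simp [calc_py]
  | cons h t ih =>
    conv_lhs => rw [calc_py, List.foldl_cons]
    rw [calc_py_foldl_shift, ih, List.map_cons, List.sum_cons, pvW_eq]
    split_ifs <;> ring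

-- pvGoFuel with enough fuel on a valid range sums pvW over the corresponding slice
theorem pvGoFuel_eq (g : List String) (fuel lo hi : Nat) (hlo : lo ≤ hi) (hhi : hi ≤ g.length)
    (hf : hi - lo ≤ fuel) :
    pvGoFuel g fuel lo hi = (((g.drop lo).take (hi - lo)).map pvW).sum := by
  induction fuel generalizing lo hi with
  | zero =>
    have h0 : hi - lo = 0 := by omega
    rw [pvGoFuel]
    simp [h0]
  | succ f ih =>
  rw [pvGoFuel]
  split_ifs with h0 h1
  · simp [h0]
  · have hlt : lo < g.length := by omega
    have : (g.drop lo).take (hi - lo) = [g[lo]] := by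
      rw [h1]
      rw [List.take_one]
      simp [List.head?_drop, List.getElem?_eq_getElem hlt]
    rw [this]
    have hget : PySem.List.pyGet? g (lo : Int) = some g[lo] := by
      simp [PySem.List.pyGet?, PySem.List.pyIdx?, hlt]
    simp [hget, pvW]
  · have hmidlo : lo < (lo + hi) / 2 := by omega
    have hmidhi : (lo + hi) / 2 < hi := by omega
    show pvGoFuel g f lo ((lo + hi) / 2) + pvGoFuel g f ((lo + hi) / 2) hi = _
    rw [ih lo ((lo + hi) / 2) (by omega) (by omega) (by omega),
        ih ((lo + hi) / 2) hi (by omega) hhi (by omega)]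
    rw [← List.sum_append, ← List.map_append]
    congr 1
    have hmn : hi - lo = ((lo + hi) / 2 - lo) + (hi - (lo + hi) / 2) := by omega
    rw [hmn, List.take_add, List.drop_drop]
    have h2 : lo + ((lo + hi) / 2 - lo) = (lo + hi) / 2 := by omega
    rw [h2]

-- ===== VERDICT (by name: the statement is the Claim_ definition above) =====
theorem calc_py_spec : Claim_equal_calc_py := by
  intro group _
  unfold Spec_calc_py
  rw [calc_py_alt, pvGo, pvGoFuel_eq group _ 0 group.length (Nat.zero_le _) le_rfl le_rfl, calc_py_eq_sum]
  simp
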